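-- pv_equiv track=rewrite | github.com/PyroGenesis/Codiq | LeetCode/2306-Naming-a-Company.py | distinctNamesBruteForce
-- ===== SOURCE A (Python) =====
-- from collections import defaultdict
-- from typing import List
--
-- def distinctNamesBruteForce(ideas: List[str]) -> int:
--     idea_set = set(ideas)
--     n = len(ideas)
--     companies = 0
--
--     valids = defaultdict(set)
--     invalids = defaultdict(set)
--
--     for i in range(n):
--         idea_a_start = ideas[i][0]
--         for j in range(i+1, n):
--             idea_b_start = ideas[j][0]
--
--             # if both are the same, simply raject
--             if idea_a_start == idea_b_start:
--                 continue
--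
--             # if any one of them are invalid, simply reject
--             if idea_a_start in invalids[j] or idea_b_start in invalids[i]:
--                 continue
--
--             # fill in whichever one doesn't already have a valid record
--             if idea_a_start not in valids[j]:
--                 if (idea_a_start + ideas[j][1:]) not in idea_set:
--                     valids[j].add(idea_a_start)
--                 else:
--                     invalids[j].add(idea_a_start)
--             if idea_b_start not in valids[i]:
--                 if (idea_b_start + ideas[i][1:]) not in idea_set:
--                     valids[i].add(idea_b_start)
--                 else:
--                     invalids[i].add(idea_b_start)
--
--             if idea_a_start in valids[j] and idea_b_start in valids[i]:
--                 companies += 2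
--
--     return companies
-- ===== SOURCE B (Python) =====
-- from typing import List
--
-- def distinctNamesBruteForce(ideas: List[str]) -> int:
--     idea_set = set(ideas)
--     letters = []
--     for w in ideas:
--         if w[0] not in letters:
--             letters.append(w[0])
--     # M[a, b] = number of ideas starting with a whose suffix, re-prefixed with b,
--     # is not an existing idea (counted with multiplicity over the input list)
--     M = {(a, b): 0 for a in letters for b in letters}
--     for w in ideas:
--         for b in letters:
--             if b + w[1:] not in idea_set:
--                 M[w[0], b] += 1
--     res = 0
--     seen = []
--     for b in letters:
--         for a in seen:
--             res += 2 * M[a, b] * M[b, a]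
--         seen.append(b)
--     return res
-- ===== Notes on version B (the rewrite author's own statement) =====
-- stated objective: faster
-- what changed: A scans all O(n^2) index pairs with per-index valid/invalid memo sets; B counts, for each ordered pair of first letters (a,b), the ideas starting with a whose suffix is not an existing idea under b, and sums 2*M[a,b]*M[b,a] over letter pairs, removing the pairwise scan.
import Mathlib
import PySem

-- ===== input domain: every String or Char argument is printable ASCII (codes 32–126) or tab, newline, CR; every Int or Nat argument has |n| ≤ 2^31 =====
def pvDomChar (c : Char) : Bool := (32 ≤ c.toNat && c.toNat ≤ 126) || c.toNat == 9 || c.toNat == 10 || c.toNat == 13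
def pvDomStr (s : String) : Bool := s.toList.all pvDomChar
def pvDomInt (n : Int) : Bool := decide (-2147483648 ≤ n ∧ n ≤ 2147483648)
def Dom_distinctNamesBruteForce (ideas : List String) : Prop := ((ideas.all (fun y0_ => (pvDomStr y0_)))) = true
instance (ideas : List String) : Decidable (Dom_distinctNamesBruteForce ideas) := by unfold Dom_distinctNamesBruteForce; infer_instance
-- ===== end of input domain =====

-- B replaces A's O(n^2) pairwise scan with memo dicts by per-(letter,letter) suffix-swap counts
-- multiplied over letter pairs (asymptotically faster); equal return value on all inputs with no empty string.

-- ===== PORT A =====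
-- w[0] of a Python string; the IndexError on "" is excluded by Pre_ (both programs raise there)
def pvHead (w : List Char) : Char := (PySem.List.pyGet? w 0).getD ' '

-- the two textually-symmetric memo-fill blocks of A's inner loop (valids/invalids at key k, letter c, word wk)
def aFill (S : PySem.Set (List Char)) (V I : PySem.Dict Int (PySem.Set Char))
    (k : Int) (c : Char) (wk : List Char) :
    PySem.Dict Int (PySem.Set Char) × PySem.Dict Int (PySem.Set Char) :=
  if !((V.getD k PySem.Set.empty).contains c) then
    if !(PySem.Set.contains S (c :: PySem.List.slice wk (some 1) none)) then
      (V.insert k ((V.getD k PySem.Set.empty).add c), I)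
    else
      (V, I.insert k ((I.getD k PySem.Set.empty).add c))
  else (V, I)

-- body of A's inner loop over j; state = (companies, valids, invalids)
def aBody (S : PySem.Set (List Char)) (l : List (List Char)) (i : Int) (wi : List Char)
    (st : Int × PySem.Dict Int (PySem.Set Char) × PySem.Dict Int (PySem.Set Char)) (j : Int) :
    Int × PySem.Dict Int (PySem.Set Char) × PySem.Dict Int (PySem.Set Char) :=
  let companies := st.1
  let valids := st.2.1
  let invalids := st.2.2
  let wj := PySem.List.pyGetD l j []
  let a := pvHead wi
  let b := pvHead wj
  if a == b then (companies, valids, invalids)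
  else if ((invalids.getD j PySem.Set.empty).contains a || (invalids.getD i PySem.Set.empty).contains b) then
    (companies, valids, invalids)
  else
    let p1 := aFill S valids invalids j a wj
    let p2 := aFill S p1.1 p1.2 i b wi
    let companies' := if ((p2.1.getD j PySem.Set.empty).contains a && (p2.1.getD i PySem.Set.empty).contains b) then companies + 2 else companies
    (companies', p2.1, p2.2)

def distinctNamesBruteForce (ideas : List String) : Int :=
  let l := ideas.map String.toList     -- strings handled on the List Char side (exact; toList is injective)
  let S := PySem.Set.ofList l          -- idea_set = set(ideas)
  let n := PySem.List.len l
  ((PySem.List.pyRange 0 n).foldl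
      (fun st i => (PySem.List.pyRange (i+1) n).foldl (aBody S l i (PySem.List.pyGetD l i [])) st)
      (0, PySem.Dict.empty, PySem.Dict.empty)).1

-- ===== PORT B =====
def distinctNamesBruteForce_alt (ideas : List String) : Int :=
  let l := ideas.map String.toList
  let S := PySem.Set.ofList l
  let letters : List Char := l.foldl (fun ls w => if ls.contains (pvHead w) then ls else ls ++ [pvHead w]) []
  let M0 : PySem.Dict (Char × Char) Int :=   -- {(a, b): 0 for a in letters for b in letters}
    letters.foldl (fun d a => letters.foldl (fun d b => d.insert (a, b) 0) d) PySem.Dict.empty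
  let M := l.foldl (fun M w =>
      letters.foldl (fun M b =>
        if !(PySem.Set.contains S (b :: PySem.List.slice w (some 1) none)) then
          M.modify (pvHead w, b) 0 (· + 1)
        else M) M) M0
  (letters.foldl
      (fun (st : Int × List Char) b =>
        (st.2.foldl (fun res a => res + 2 * (M.getD (a, b) 0) * (M.getD (b, a) 0)) st.1, st.2 ++ [b]))
      (0, [])).1

-- ===== PRECONDITION & SPEC =====
-- Pre_ excludes lists containing an empty string: there Python A raises IndexError on ideas[i][0] (and B raises too).
def Pre_distinctNamesBruteForce (ideas : List String) : Prop := ∀ s ∈ ideas, s ≠ ""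
instance (ideas : List String) : Decidable (Pre_distinctNamesBruteForce ideas) := by unfold Pre_distinctNamesBruteForce; infer_instance
def pvWitness_distinctNamesBruteForce : List String := ["coffee", "donuts", "time", "toffee"]

def Spec_distinctNamesBruteForce (ideas : List String) (out : Int) : Prop := out = distinctNamesBruteForce_alt ideas
instance (ideas : List String) (out : Int) : Decidable (Spec_distinctNamesBruteForce ideas out) := by unfold Spec_distinctNamesBruteForce; infer_instance

-- ===== CLAIM (what is proved, stated in full; the proofs are below) =====
def Claim_equal_distinctNamesBruteForce : Prop := ∀ (ideas : List String), Dom_distinctNamesBruteForce ideas → Pre_distinctNamesBruteForce ideas → Spec_distinctNamesBruteForce ideas (distinctNamesBruteForce ideas)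

-- ===== LEMMAS AND PROOFS =====

-- swap-validity indicator: 1 iff prefixing u's suffix with b gives a name outside S
def hT (S : PySem.Set (List Char)) (b : Char) (u : List Char) : Int :=
  if (b :: u.tail) ∈ S then 0 else 1

-- counted predicate behind B's matrix M: u starts with a and its b-swap leaves S
def gC (S : PySem.Set (List Char)) (a b : Char) (u : List Char) : Int :=
  if pvHead u = a then hT S b u else 0

-- 0/1 value of one unordered pair in A's double loop
def ok01 (S : PySem.Set (List Char)) (u v : List Char) : Int :=
  if pvHead u = pvHead v then 0 else hT S (pvHead v) u * hT S (pvHead u) v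

-- sum of f over all ordered pairs (earlier element, later element) of a list
def pairSum (f : Char → Char → Int) : List Char → Int
  | [] => 0
  | x :: xs => (xs.map (f x)).sum + pairSum f xs

def pairSumW (f : List Char → List Char → Int) : List (List Char) → Int
  | [] => 0
  | x :: xs => (xs.map (f x)).sum + pairSumW f xs

def cnt (S : PySem.Set (List Char)) (l : List (List Char)) (a b : Char) : Int :=
  ((l.map (gC S a b)).sum)

-- invariants of A's memo dicts
def GoodV (S : PySem.Set (List Char)) (l : List (List Char)) (V : PySem.Dict Int (PySem.Set Char)) : Prop :=
  ∀ (k : Int) (c : Char), c ∈ V.getD k PySem.Set.empty → ¬ (c :: (PySem.List.pyGetD l k []).tail) ∈ S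
def GoodI (S : PySem.Set (List Char)) (l : List (List Char)) (I : PySem.Dict Int (PySem.Set Char)) : Prop :=
  ∀ (k : Int) (c : Char), c ∈ I.getD k PySem.Set.empty → (c :: (PySem.List.pyGetD l k []).tail) ∈ S

theorem aFill_spec (S : PySem.Set (List Char)) (l : List (List Char))
    (V I : PySem.Dict Int (PySem.Set Char)) (k : Int) (c : Char)
    (hV : GoodV S l V) (hI : GoodI S l I) :
    GoodV S l (aFill S V I k c (PySem.List.pyGetD l k [])).1 ∧
    GoodI S l (aFill S V I k c (PySem.List.pyGetD l k [])).2 ∧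
    ((c ∈ (aFill S V I k c (PySem.List.pyGetD l k [])).1.getD k PySem.Set.empty) ↔
      ¬ (c :: (PySem.List.pyGetD l k []).tail) ∈ S) ∧
    (∀ k', k' ≠ k →
      (aFill S V I k c (PySem.List.pyGetD l k [])).1.getD k' PySem.Set.empty = V.getD k' PySem.Set.empty ∧
      (aFill S V I k c (PySem.List.pyGetD l k [])).2.getD k' PySem.Set.empty = I.getD k' PySem.Set.empty) := by
  set wk := PySem.List.pyGetD l k [] with hwk
  unfold aFill
  simp only [PySem.List.slice_from_one]
  by_cases h1 : (V.getD k PySem.Set.empty).contains c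
  · simp only [h1, Bool.not_true, Bool.false_eq_true, if_false]
    have hcv : c ∈ V.getD k PySem.Set.empty := (PySem.Set.contains_iff _ _).mp h1
    exact ⟨hV, hI, ⟨fun _ => hV k c hcv, fun _ => hcv⟩, fun k' _ => ⟨by trivial, by trivial⟩⟩
  · have h1' : (V.getD k PySem.Set.empty).contains c = false := by
      rw [Bool.eq_false_iff]; exact h1
    simp only [h1', Bool.not_false, if_true]
    by_cases h2 : PySem.Set.contains S (c :: wk.tail)
    · simp only [h2, Bool.not_true, Bool.false_eq_true, if_false]
      have hmemS : (c :: wk.tail) ∈ S := (PySem.Set.contains_iff _ _).mp h2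
      refine ⟨hV, ?_, ?_, fun k' hne => ⟨by trivial, ?_⟩⟩
      · intro k' c' hmem
        rw [PySem.Dict.getD_insert] at hmem
        split_ifs at hmem with hk
        · subst hk
          rcases (PySem.Set.mem_add _ _ _).mp hmem with h | h
          · exact hI k' c' h
          · subst h; exact hmemS
        · exact hI k' c' hmem
      · constructor
        · intro hc; exact absurd ((PySem.Set.contains_iff _ _).mpr hc) h1
        · intro hn; exact absurd hmemS hn
      · rw [PySem.Dict.getD_insert, if_neg hne]
    · have h2' : PySem.Set.contains S (c :: wk.tail) = false := by
        rw [Bool.eq_false_iff]; exact h2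
      have hnotS : ¬ (c :: wk.tail) ∈ S := fun h => h2 ((PySem.Set.contains_iff _ _).mpr h)
      simp only [h2', Bool.not_false, if_true]
      refine ⟨?_, hI, ?_, fun k' hne => ⟨?_, by trivial⟩⟩
      · intro k' c' hmem
        rw [PySem.Dict.getD_insert] at hmem
        split_ifs at hmem with hk
        · subst hk
          rcases (PySem.Set.mem_add _ _ _).mp hmem with h | h
          · exact hV k' c' h
          · subst h; exact hnotS
        · exact hV k' c' hmem
      · rw [PySem.Dict.getD_insert, if_pos rfl]
        exact ⟨fun _ => hnotS, fun _ => (PySem.Set.mem_add _ _ _).mpr (Or.inr rfl)⟩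
      · rw [PySem.Dict.getD_insert, if_neg hne]

theorem aBody_step (S : PySem.Set (List Char)) (l : List (List Char)) (i j : Int) (hij : i ≠ j)
    (c : Int) (V I : PySem.Dict Int (PySem.Set Char)) (hV : GoodV S l V) (hI : GoodI S l I) :
    ∃ V' I', aBody S l i (PySem.List.pyGetD l i []) (c, V, I) j =
        (c + 2 * ok01 S (PySem.List.pyGetD l i []) (PySem.List.pyGetD l j []), V', I') ∧
      GoodV S l V' ∧ GoodI S l I' := by
  unfold aBody
  dsimp only
  by_cases hab : pvHead (PySem.List.pyGetD l i []) = pvHead (PySem.List.pyGetD l j [])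
  · rw [if_pos (by simp [hab])]
    refine ⟨V, I, ?_, hV, hI⟩
    have h0 : ok01 S (PySem.List.pyGetD l i []) (PySem.List.pyGetD l j []) = 0 := by
      simp [ok01, hab]
    rw [h0]
    norm_num
  · rw [if_neg (by simp [hab])]
    by_cases hinv : (((I.getD j PySem.Set.empty).contains (pvHead (PySem.List.pyGetD l i []))) ||
        ((I.getD i PySem.Set.empty).contains (pvHead (PySem.List.pyGetD l j [])))) = true
    · rw [if_pos hinv]
      refine ⟨V, I, ?_, hV, hI⟩
      have h0 : ok01 S (PySem.List.pyGetD l i []) (PySem.List.pyGetD l j []) = 0 := by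
        rcases Bool.or_eq_true_iff.mp hinv with h | h
        · have := hI j _ ((PySem.Set.contains_iff _ _).mp h)
          simp [ok01, hab, hT, this]
        · have := hI i _ ((PySem.Set.contains_iff _ _).mp h)
          simp [ok01, hab, hT, this]
      rw [h0]
      norm_num
    · rw [if_neg hinv]
      obtain ⟨s1V, s1I, s1c, s1ne⟩ :=
        aFill_spec S l V I j (pvHead (PySem.List.pyGetD l i [])) hV hI
      obtain ⟨s2V, s2I, s2c, s2ne⟩ :=
        aFill_spec S l (aFill S V I j (pvHead (PySem.List.pyGetD l i [])) (PySem.List.pyGetD l j [])).1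
          (aFill S V I j (pvHead (PySem.List.pyGetD l i [])) (PySem.List.pyGetD l j [])).2
          i (pvHead (PySem.List.pyGetD l j [])) s1V s1I
      set p2 := (aFill S (aFill S V I j (pvHead (PySem.List.pyGetD l i [])) (PySem.List.pyGetD l j [])).1
          (aFill S V I j (pvHead (PySem.List.pyGetD l i [])) (PySem.List.pyGetD l j [])).2 i
          (pvHead (PySem.List.pyGetD l j [])) (PySem.List.pyGetD l i [])) with hp2
      refine ⟨p2.1, p2.2, ?_, s2V, s2I⟩
      have hj2 := (s2ne j (Ne.symm hij)).1
      have hmemA : pvHead (PySem.List.pyGetD l i []) ∈ p2.1.getD j PySem.Set.empty ↔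
          ¬ pvHead (PySem.List.pyGetD l i []) :: (PySem.List.pyGetD l j []).tail ∈ S := by
        rw [hj2]; exact s1c
      have hmemB : pvHead (PySem.List.pyGetD l j []) ∈ p2.1.getD i PySem.Set.empty ↔
          ¬ pvHead (PySem.List.pyGetD l j []) :: (PySem.List.pyGetD l i []).tail ∈ S := s2c
      by_cases hA : pvHead (PySem.List.pyGetD l i []) :: (PySem.List.pyGetD l j []).tail ∈ S
      · rw [if_neg (show ¬ _ = true by
          simp only [Bool.and_eq_true]
          rintro ⟨hx, -⟩
          exact (hmemA.mp ((PySem.Set.contains_iff _ _).mp hx)) hA)]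
        have h0 : ok01 S (PySem.List.pyGetD l i []) (PySem.List.pyGetD l j []) = 0 := by
          simp [ok01, hab, hT, hA]
        rw [h0]
        norm_num
      · by_cases hB : pvHead (PySem.List.pyGetD l j []) :: (PySem.List.pyGetD l i []).tail ∈ S
        · rw [if_neg (show ¬ _ = true by
            simp only [Bool.and_eq_true]
            rintro ⟨-, hx⟩
            exact (hmemB.mp ((PySem.Set.contains_iff _ _).mp hx)) hB)]
          have h0 : ok01 S (PySem.List.pyGetD l i []) (PySem.List.pyGetD l j []) = 0 := by
            simp [ok01, hab, hT, hB]
          rw [h0]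
          norm_num
        · rw [if_pos (show _ = true by
            simp only [Bool.and_eq_true]
            exact ⟨(PySem.Set.contains_iff _ _).mpr (hmemA.mpr hA),
              (PySem.Set.contains_iff _ _).mpr (hmemB.mpr hB)⟩)]
          have h0 : ok01 S (PySem.List.pyGetD l i []) (PySem.List.pyGetD l j []) = 1 := by
            simp [ok01, hab, hT, hA, hB]
          rw [h0]
          norm_num

theorem inner_loop (S : PySem.Set (List Char)) (l : List (List Char)) (i : Int) :
    ∀ (js : List Int), (∀ j ∈ js, i ≠ j) → ∀ (c : Int) V I, GoodV S l V → GoodI S l I →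
    ∃ V' I', js.foldl (aBody S l i (PySem.List.pyGetD l i [])) (c, V, I) =
        (c + 2 * ((js.map (fun j => ok01 S (PySem.List.pyGetD l i []) (PySem.List.pyGetD l j []))).sum), V', I') ∧
      GoodV S l V' ∧ GoodI S l I' := by
  intro js
  induction js with
  | nil =>
      intro _ c V I hV hI
      exact ⟨V, I, by norm_num, hV, hI⟩
  | cons j js ih =>
      intro hall c V I hV hI
      obtain ⟨V1, I1, heq1, hV1, hI1⟩ := aBody_step S l i j (hall j (by simp)) c V I hV hI
      obtain ⟨V2, I2, heq2, hV2, hI2⟩ := ih (fun j' hj' => hall j' (by simp [hj'])) _ V1 I1 hV1 hI1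
      refine ⟨V2, I2, ?_, hV2, hI2⟩
      rw [List.foldl_cons, heq1, heq2]
      simp only [List.map_cons, List.sum_cons, Prod.mk.injEq]
      refine ⟨by ring, by trivial⟩

theorem outer_loop (S : PySem.Set (List Char)) (l : List (List Char)) (n : Int) :
    ∀ (is : List Int) (c : Int) V I, GoodV S l V → GoodI S l I →
    ∃ V' I', is.foldl (fun st i => (PySem.List.pyRange (i+1) n).foldl (aBody S l i (PySem.List.pyGetD l i [])) st) (c, V, I) =
        (c + 2 * ((is.map (fun i => ((PySem.List.pyRange (i+1) n).map
            (fun j => ok01 S (PySem.List.pyGetD l i []) (PySem.List.pyGetD l j []))).sum)).sum), V', I') ∧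
      GoodV S l V' ∧ GoodI S l I' := by
  intro is
  induction is with
  | nil =>
      intro c V I hV hI
      exact ⟨V, I, by norm_num, hV, hI⟩
  | cons i is ih =>
      intro c V I hV hI
      have hall : ∀ j ∈ PySem.List.pyRange (i+1) n, i ≠ j := by
        intro j hj
        have := (PySem.List.mem_pyRange_one.mp hj).1
        omega
      obtain ⟨V1, I1, heq1, hV1, hI1⟩ := inner_loop S l i (PySem.List.pyRange (i+1) n) hall c V I hV hI
      obtain ⟨V2, I2, heq2, hV2, hI2⟩ := ih _ V1 I1 hV1 hI1
      refine ⟨V2, I2, ?_, hV2, hI2⟩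
      rw [List.foldl_cons, heq1, heq2]
      simp only [List.map_cons, List.sum_cons, Prod.mk.injEq]
      refine ⟨by ring, by trivial⟩

theorem sumInnerRange (g : List Char → Int) (l : List (List Char)) (i : Int) (hi : 0 ≤ i) :
    ((PySem.List.pyRange (i+1) (PySem.List.len l)).map (fun j => g (PySem.List.pyGetD l j []))).sum =
      ((l.drop (i+1).toNat).map g).sum := by
  have h := PySem.List.foldl_pyRange_pyGetD l ([] : List Char) (fun acc v => acc + g v) 0
    (a := i + 1) (by omega)
  simp only [PySem.List.foldl_add] at h
  omega

theorem idx_pairSum (f : List Char → List Char → Int) :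
    ∀ (l : List (List Char)),
      ((PySem.List.pyRange 0 (PySem.List.len l)).map (fun i =>
        ((l.drop (i+1).toNat).map (f (PySem.List.pyGetD l i []))).sum)).sum = pairSumW f l := by
  intro l
  induction l with
  | nil => simp [pairSumW, PySem.List.len_eq, PySem.List.pyRange_one_eq_nil]
  | cons x xs ih =>
      have h0 : (0:Int) < (xs.length : Int) + 1 := by positivity
      rw [show PySem.List.len (x :: xs) = (xs.length : Int) + 1 by
        simp [PySem.List.len_eq]]
      rw [PySem.List.pyRange_one_cons h0]
      simp only [List.map_cons, List.sum_cons]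
      have hhead : (((x :: xs).drop ((0:Int)+1).toNat).map (f (PySem.List.pyGetD (x :: xs) 0 []))).sum
          = (xs.map (f x)).sum := by
        norm_num [PySem.List.pyGetD_zero_cons]
      have htail : ((PySem.List.pyRange (0+1) ((xs.length:Int)+1)).map (fun i =>
            (((x :: xs).drop (i+1).toNat).map (f (PySem.List.pyGetD (x :: xs) i []))).sum)).sum
          = pairSumW f xs := by
        rw [← ih]
        rw [show PySem.List.len xs = (xs.length : Int) by simp [PySem.List.len_eq]]
        rw [PySem.List.pyRange_one 0 (xs.length:Int), PySem.List.pyRange_one (0+1) ((xs.length:Int)+1)]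
        rw [show ((xs.length:Int) + 1 - (0+1)).toNat = xs.length by omega,
          show ((xs.length:Int) - 0).toNat = xs.length by omega]
        rw [List.map_map, List.map_map]
        apply congrArg
        apply List.map_congr_left
        intro k hk
        simp only [Function.comp_apply]
        have e3 : PySem.List.pyGetD (x :: xs) ((0:Int)+1+(k:Int)) [] = PySem.List.pyGetD xs (k:Int) [] := by
          rw [show (0:Int)+1+(k:Int) = ((k+1 : Nat) : Int) by push_cast; ring]
          simp only [PySem.List.pyGetD_natCast]
          exact List.getD_cons_succ ..
        rw [show ((0:Int)+1+(k:Int)+1).toNat = k + 2 by omega, e3,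
          show ((0:Int)+(k:Int)+1).toNat = k + 1 by omega]
        rw [List.drop_succ_cons]
        norm_num
      rw [hhead, htail]
      rfl

theorem good_empty (S : PySem.Set (List Char)) (l : List (List Char)) :
    GoodV S l PySem.Dict.empty ∧ GoodI S l PySem.Dict.empty := by
  constructor <;> · intro k c h; rw [PySem.Dict.getD_empty] at h; exact absurd h (List.not_mem_nil)

theorem A_eq (ideas : List String) :
    distinctNamesBruteForce ideas =
      2 * pairSumW (ok01 (PySem.Set.ofList (ideas.map String.toList))) (ideas.map String.toList) := by
  unfold distinctNamesBruteForce
  dsimp only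
  obtain ⟨V', I', heq, -, -⟩ := outer_loop (PySem.Set.ofList (ideas.map String.toList))
    (ideas.map String.toList) (PySem.List.len (ideas.map String.toList))
    (PySem.List.pyRange 0 (PySem.List.len (ideas.map String.toList)))
    0 PySem.Dict.empty PySem.Dict.empty
    (good_empty _ _).1 (good_empty _ _).2
  rw [heq]
  dsimp only
  rw [zero_add]
  congr 1
  rw [← idx_pairSum (ok01 (PySem.Set.ofList (ideas.map String.toList))) (ideas.map String.toList)]
  apply congrArg
  apply List.map_congr_left
  intro i hi
  exact sumInnerRange _ _ i (PySem.List.mem_pyRange_one.mp hi).1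

-- list double sums: swap, collapse of an indicator, symmetric-diagonal-zero halving
theorem sum_swap {α β : Type} (l : List α) (m : List β) (F : α → β → Int) :
    (l.map (fun x => (m.map (fun y => F x y)).sum)).sum =
      (m.map (fun y => (l.map (fun x => F x y)).sum)).sum := by
  induction l with
  | nil => simp
  | cons x xs ih =>
      simp only [List.map_cons, List.sum_cons, ih, PySem.List.sum_map_add_int]

theorem collapse (X : Char → Int) :
    ∀ (ls : List Char), ls.Nodup → ∀ c ∈ ls,
      (ls.map (fun a => if c = a then X a else 0)).sum = X c := by
  intro ls hnd c hc
  induction ls with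
  | nil => simp at hc
  | cons a as ih =>
      simp only [List.map_cons, List.sum_cons]
      rcases List.mem_cons.mp hc with h | h
      · subst h
        have : (as.map (fun a => if c = a then X a else 0)).sum = 0 := by
          have : ∀ a ∈ as, (if c = a then X a else 0) = 0 := by
            intro b hb
            have : c ≠ b := by rintro rfl; exact (List.nodup_cons.mp hnd).1 hb
            simp [this]
          rw [List.map_congr_left this]
          simp
        simp [this]
      · have hne : c ≠ a := by rintro rfl; exact (List.nodup_cons.mp hnd).1 h
        rw [ih (List.nodup_cons.mp hnd).2 h]
        simp [hne]

theorem dbl_pairSum (f : List Char → List Char → Int)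
    (hsym : ∀ u v, f u v = f v u) (hdiag : ∀ u, f u u = 0) :
    ∀ (l : List (List Char)),
      (l.map (fun u => (l.map (fun v => f u v)).sum)).sum = 2 * pairSumW f l := by
  intro l
  induction l with
  | nil => simp [pairSumW]
  | cons x xs ih =>
      simp only [List.map_cons, List.sum_cons, pairSumW, PySem.List.sum_map_add_int, hdiag]
      have hxx : (xs.map (fun v => f x v)).sum = (xs.map (fun u => f u x)).sum := by
        apply congrArg
        exact List.map_congr_left (fun u _ => hsym x u)
      rw [ih]
      ring_nf
      rw [hxx]
      ring

theorem pairSum_two (t : Char → Char → Int) :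
    ∀ (ls : List Char), ls.Nodup →
      (ls.map (fun a => (ls.map (fun b => if a = b then 0 else t a b)).sum)).sum =
        pairSum (fun a b => t a b + t b a) ls := by
  intro ls hnd
  induction ls with
  | nil => simp [pairSum]
  | cons x xs ih =>
      obtain ⟨hx, hnd'⟩ := List.nodup_cons.mp hnd
      have h1 : (xs.map (fun b => if x = b then 0 else t x b)) = xs.map (fun b => t x b) :=
        List.map_congr_left (fun b hb => by
          have : x ≠ b := fun h => hx (h ▸ hb); simp [this])
      have h2 : (xs.map (fun a => (if a = x then 0 else t a x) +
            (xs.map (fun b => if a = b then 0 else t a b)).sum)) =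
          xs.map (fun a => t a x + (xs.map (fun b => if a = b then 0 else t a b)).sum) :=
        List.map_congr_left (fun a ha => by
          have : a ≠ x := fun h => hx (h ▸ ha); simp [this])
      simp only [List.map_cons, List.sum_cons, pairSum]
      rw [if_true, h1, h2, PySem.List.sum_map_add_int, ← ih hnd', PySem.List.sum_map_add_int]
      ring

theorem pairSum_congr (f g : Char → Char → Int) :
    ∀ (ls : List Char), (∀ a ∈ ls, ∀ b ∈ ls, f a b = g a b) → pairSum f ls = pairSum g ls := by
  intro ls h
  induction ls with
  | nil => rfl
  | cons x xs ih =>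
      simp only [pairSum]
      rw [List.map_congr_left (fun b hb => h x (by simp) b (by simp [hb])),
        ih (fun a ha b hb => h a (by simp [ha]) b (by simp [hb]))]

theorem ok01_pointwise (S : PySem.Set (List Char)) (letters : List Char) (hnd : letters.Nodup)
    (u v : List Char) (hu : pvHead u ∈ letters) (hv : pvHead v ∈ letters) :
    (letters.map (fun a => (letters.map (fun b =>
        if a = b then 0 else gC S a b u * gC S b a v)).sum)).sum = ok01 S u v := by
  have step1 : ∀ a, (letters.map (fun b => if a = b then 0 else gC S a b u * gC S b a v)).sum
      = if a = pvHead v then 0 else gC S a (pvHead v) u * hT S a v := by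
    intro a
    have hpt : ∀ b ∈ letters, (if a = b then 0 else gC S a b u * gC S b a v)
        = (if pvHead v = b then (if a = b then (0:Int) else gC S a b u * hT S a v) else 0) := by
      intro b _
      by_cases h : pvHead v = b
      · simp [gC, ← h]
      · simp only [if_neg h]
        have : gC S b a v = 0 := by simp [gC, h]
        rw [this, mul_zero, ite_self]
    rw [List.map_congr_left hpt]
    exact collapse (fun b => if a = b then 0 else gC S a b u * hT S a v) letters hnd _ hv
  have step2 : ∀ a ∈ letters, (if a = pvHead v then (0:Int) else gC S a (pvHead v) u * hT S a v)
      = if pvHead u = a then (if a = pvHead v then 0 else hT S (pvHead v) u * hT S a v) else 0 := by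
    intro a _
    by_cases h : pvHead u = a
    · simp [gC, ← h]
    · have : gC S a (pvHead v) u = 0 := by simp [gC, h]
      rw [if_neg h, this, zero_mul, ite_self]
  rw [List.map_congr_left (fun a ha => (step1 a).trans (step2 a ha))]
  rw [collapse (fun a => if a = pvHead v then 0 else hT S (pvHead v) u * hT S a v) letters hnd _ hu]
  simp [ok01]

theorem count_chain (S : PySem.Set (List Char)) (l : List (List Char)) (letters : List Char)
    (hnd : letters.Nodup) (hmem : ∀ u ∈ l, pvHead u ∈ letters) :
    (l.map (fun u => (l.map (fun v => ok01 S u v)).sum)).sum =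
      (letters.map (fun a => (letters.map (fun b =>
        if a = b then 0 else cnt S l a b * cnt S l b a)).sum)).sum := by
  have h1 : (l.map (fun u => (l.map (fun v => ok01 S u v)).sum)).sum =
      (l.map (fun u => (l.map (fun v => (letters.map (fun a => (letters.map (fun b =>
        if a = b then 0 else gC S a b u * gC S b a v)).sum)).sum)).sum)).sum := by
    apply congrArg
    apply List.map_congr_left
    intro u hu
    apply congrArg
    apply List.map_congr_left
    intro v hv
    exact (ok01_pointwise S letters hnd u v (hmem u hu) (hmem v hv)).symm
  rw [h1]
  -- push the letter sums outside the idea sums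
  have h2 : ∀ u ∈ l, (l.map (fun v => (letters.map (fun a => (letters.map (fun b =>
        if a = b then 0 else gC S a b u * gC S b a v)).sum)).sum)).sum =
      (letters.map (fun a => (letters.map (fun b =>
        if a = b then 0 else gC S a b u * cnt S l b a)).sum)).sum := by
    intro u _
    rw [sum_swap]
    apply congrArg
    apply List.map_congr_left
    intro a _
    rw [sum_swap]
    apply congrArg
    apply List.map_congr_left
    intro b _
    by_cases h : a = b
    · simp [h]
    · simp only [if_neg h]
      exact List.sum_map_mul_left l (gC S b a) (gC S a b u)
  rw [List.map_congr_left h2, sum_swap]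
  apply congrArg
  apply List.map_congr_left
  intro a _
  rw [sum_swap]
  apply congrArg
  apply List.map_congr_left
  intro b _
  by_cases h : a = b
  · simp [h]
  · simp only [if_neg h]
    exact List.sum_map_mul_right l (gC S a b) (cnt S l b a)

-- B-side: the letters list, the matrix M, the pair loop
theorem letters_eq (l : List (List Char)) :
    l.foldl (fun ls w => if ls.contains (pvHead w) then ls else ls ++ [pvHead w]) [] =
      PySem.Set.ofList (l.map pvHead) := by
  rw [← PySem.Set.update_nil_left, PySem.Set.update_map_eq_foldl_add]
  have : (fun (s : PySem.Set Char) (b : List Char) => PySem.Set.add s (pvHead b)) =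
      (fun ls w => if ls.contains (pvHead w) = true then ls else ls ++ [pvHead w]) := by
    funext s w
    rw [PySem.Set.add_eq_ite]
    by_cases h : pvHead w ∈ s <;> simp [h]
  rw [this]

theorem M0_zero (letters : List Char) (q : Char × Char) :
    (letters.foldl (fun d a => letters.foldl (fun d b => d.insert (a, b) 0) d)
      (PySem.Dict.empty : PySem.Dict (Char × Char) Int)).getD q 0 = 0 := by
  have inner : ∀ (a : Char) (bs : List Char) (d : PySem.Dict (Char × Char) Int),
      d.getD q 0 = 0 → (bs.foldl (fun d b => d.insert (a, b) 0) d).getD q 0 = 0 := by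
    intro a bs
    induction bs with
    | nil => intro d h; exact h
    | cons b bs ih =>
        intro d h
        apply ih
        rw [PySem.Dict.getD_insert]
        split <;> simp [h]
  have outer : ∀ (as : List Char) (d : PySem.Dict (Char × Char) Int),
      d.getD q 0 = 0 →
      (as.foldl (fun d a => letters.foldl (fun d b => d.insert (a, b) 0) d) d).getD q 0 = 0 := by
    intro as
    induction as with
    | nil => intro d h; exact h
    | cons a as ih => intro d h; exact ih _ (inner a letters d h)
  exact outer letters _ (by simp [PySem.Dict.getD_empty])

theorem M_inner (S : PySem.Set (List Char)) (w : List Char) (a b : Char) :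
    ∀ (bs : List Char), bs.Nodup → ∀ (M : PySem.Dict (Char × Char) Int),
      (bs.foldl (fun M b' =>
        if !(PySem.Set.contains S (b' :: PySem.List.slice w (some 1) none)) then
          M.modify (pvHead w, b') 0 (· + 1)
        else M) M).getD (a, b) 0 =
      M.getD (a, b) 0 + (if b ∈ bs then gC S a b w else 0) := by
  intro bs
  induction bs with
  | nil => intro _ M; simp
  | cons b' bs ih =>
      intro hnd M
      obtain ⟨hb', hnd'⟩ := List.nodup_cons.mp hnd
      simp only [List.foldl_cons]
      rw [ih hnd']
      simp only [PySem.List.slice_from_one]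
      by_cases hmemS : (b' :: w.tail) ∈ S
      · have hc : PySem.Set.contains S (b' :: w.tail) = true := (PySem.Set.contains_iff S _).mpr hmemS
        simp only [hc, Bool.not_true, Bool.false_eq_true, if_false]
        by_cases hbb : b = b'
        · subst hbb
          simp [List.mem_cons, hb', gC, hT, hmemS]
        · simp [List.mem_cons, hbb]
      · have hc : PySem.Set.contains S (b' :: w.tail) = false := by
          rw [Bool.eq_false_iff]
          intro h
          exact hmemS ((PySem.Set.contains_iff S _).mp h)
        simp only [hc, Bool.not_false, if_true]
        rw [PySem.Dict.getD_modify]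
        by_cases hbb : b = b'
        · subst hbb
          by_cases hha : pvHead w = a
          · have : ((a, b) = (pvHead w, b)) := by simp [hha]
            simp [this, List.mem_cons, hb', gC, hT, hha, hmemS]
          · have : ¬ ((a, b) = (pvHead w, b)) := by simp [Prod.ext_iff]; intro h; exact absurd h.symm hha
            simp [this, List.mem_cons, hb', gC, hha]
        · have : ¬ ((a, b) = (pvHead w, b')) := by simp [Prod.ext_iff]; intro _; exact hbb
          simp [this, List.mem_cons, hbb]

theorem M_eq (S : PySem.Set (List Char)) (letters : List Char) (hnd : letters.Nodup) (a b : Char)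
    (hb : b ∈ letters) :
    ∀ (ws : List (List Char)) (M : PySem.Dict (Char × Char) Int),
      (ws.foldl (fun M w =>
        letters.foldl (fun M b' =>
          if !(PySem.Set.contains S (b' :: PySem.List.slice w (some 1) none)) then
            M.modify (pvHead w, b') 0 (· + 1)
          else M) M) M).getD (a, b) 0 =
      M.getD (a, b) 0 + cnt S ws a b := by
  intro ws
  induction ws with
  | nil => intro M; simp [cnt]
  | cons w ws ih =>
      intro M
      simp only [List.foldl_cons]
      rw [ih, M_inner S w a b letters hnd, if_pos hb]
      simp only [cnt, List.map_cons, List.sum_cons]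
      ring

theorem B_loop (f : Char → Char → Int) :
    ∀ (bs : List Char) (res : Int) (s : List Char),
      (bs.foldl (fun (st : Int × List Char) b =>
          (st.2.foldl (fun r a => r + f a b) st.1, st.2 ++ [b])) (res, s)).1 =
        res + (s.map (fun a => (bs.map (fun b => f a b)).sum)).sum + pairSum f bs := by
  intro bs
  induction bs with
  | nil => intro res s; simp [pairSum]
  | cons b bs ih =>
      intro res s
      simp only [List.foldl_cons]
      rw [ih, PySem.List.foldl_add]
      simp only [List.map_append, List.sum_append, List.map_cons, List.sum_cons,
        List.map_nil, List.sum_nil, pairSum, PySem.List.sum_map_add_int]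
      ring

theorem B_eq (ideas : List String) :
    distinctNamesBruteForce_alt ideas =
      pairSum (fun a b =>
          2 * cnt (PySem.Set.ofList (ideas.map String.toList)) (ideas.map String.toList) a b *
            cnt (PySem.Set.ofList (ideas.map String.toList)) (ideas.map String.toList) b a)
        (PySem.Set.ofList ((ideas.map String.toList).map pvHead)) := by
  unfold distinctNamesBruteForce_alt
  simp only [letters_eq]
  rw [B_loop]
  simp only [List.map_nil, List.sum_nil, zero_add]
  apply pairSum_congr
  intro a ha b hb
  rw [M_eq _ _ (PySem.Set.nodup_ofList _) a b hb _ _,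
    M_eq _ _ (PySem.Set.nodup_ofList _) b a ha _ _, M0_zero, M0_zero]
  ring

theorem ok01_symm (S : PySem.Set (List Char)) (u v : List Char) : ok01 S u v = ok01 S v u := by
  unfold ok01
  by_cases h : pvHead u = pvHead v
  · rw [if_pos h, if_pos h.symm]
  · rw [if_neg h, if_neg (Ne.symm h)]
    ring

theorem ok01_diag (S : PySem.Set (List Char)) (u : List Char) : ok01 S u u = 0 := by
  simp [ok01]

-- ===== VERDICT (by name: the statement is the Claim_ definition above) =====
theorem distinctNamesBruteForce_spec : Claim_equal_distinctNamesBruteForce := by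
  intro ideas _ _
  unfold Spec_distinctNamesBruteForce
  rw [A_eq, B_eq]
  rw [← dbl_pairSum (ok01 (PySem.Set.ofList (ideas.map String.toList))) (ok01_symm _) (ok01_diag _)
    (ideas.map String.toList)]
  rw [count_chain (PySem.Set.ofList (ideas.map String.toList)) (ideas.map String.toList)
    (PySem.Set.ofList ((ideas.map String.toList).map pvHead)) (PySem.Set.nodup_ofList _)
    (fun u hu => (PySem.Set.mem_ofList _ _).mpr (List.mem_map_of_mem hu))]
  rw [pairSum_two (fun a b => cnt (PySem.Set.ofList (ideas.map String.toList)) (ideas.map String.toList) a b *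
      cnt (PySem.Set.ofList (ideas.map String.toList)) (ideas.map String.toList) b a)
    (PySem.Set.ofList ((ideas.map String.toList).map pvHead)) (PySem.Set.nodup_ofList _)]
  apply pairSum_congr
  intro a _ b _
  ring
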